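-- pv_equiv track=rewrite | github.com/GregPelander/WordleKiller | wordle_utils.py | find_max_freq
-- ===== SOURCE A (Python) =====
-- def find_max_freq(freq_dict, excluded):
--     max_count = 0
--     max_letter = None
--     for letter in freq_dict:
--         if freq_dict[letter] > max_count and letter not in excluded:
--             max_count = freq_dict[letter]
--             max_letter = letter
--     return max_letter
-- ===== SOURCE B (Python) =====
-- def find_max_freq(freq_dict, excluded):
--     # two-pass: compute the max eligible count, then return the first letter attaining it
--     best = max((count for letter, count in freq_dict.items() if letter not in excluded), default=0)
--     if best <= 0:
--         return None
--     for letter, count in freq_dict.items():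
--         if count == best and letter not in excluded:
--             return letter
--     return None
-- ===== Notes on version B (the rewrite author's own statement) =====
-- stated objective: alternative
-- what changed: Replaces the single running-argmax loop carrying (max_count, max_letter) state with a stateless two-pass scheme: first compute the maximum eligible count with max(..., default=0), then return the first letter attaining it.
import Mathlib
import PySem

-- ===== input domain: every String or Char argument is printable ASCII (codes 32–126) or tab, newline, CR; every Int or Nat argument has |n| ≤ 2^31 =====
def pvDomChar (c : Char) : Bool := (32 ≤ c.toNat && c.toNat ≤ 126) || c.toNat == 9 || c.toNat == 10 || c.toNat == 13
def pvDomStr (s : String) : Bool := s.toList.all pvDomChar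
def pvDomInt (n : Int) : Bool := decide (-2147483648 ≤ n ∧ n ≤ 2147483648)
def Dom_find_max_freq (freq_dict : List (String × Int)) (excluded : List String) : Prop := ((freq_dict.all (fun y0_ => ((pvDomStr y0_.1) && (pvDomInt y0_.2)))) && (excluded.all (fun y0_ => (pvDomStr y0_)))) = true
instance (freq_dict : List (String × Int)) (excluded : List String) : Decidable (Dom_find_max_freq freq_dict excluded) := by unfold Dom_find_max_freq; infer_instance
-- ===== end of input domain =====

-- B replaces A's running-argmax loop (state (max_count, max_letter)) by a stateless
-- two-pass scheme: max eligible count first, then first letter attaining it (objective: alternative).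

-- ===== PORT A =====
-- A iterates over the dict's keys and looks each key up; 'freq_dict[letter]' is exact as
-- 'getD _ 0' because every iterated letter is a key of the dict (no KeyError is reachable).
def find_max_freq (freq_dict : List (String × Int)) (excluded : List String) : Option String :=
  let d : PySem.Dict String Int := PySem.Dict.mk freq_dict
  let st := (PySem.Dict.keys d).foldl
    (fun (st : Int × Option String) letter =>
      if decide (PySem.Dict.getD d letter 0 > st.1) && !(excluded.contains letter)
      then (PySem.Dict.getD d letter 0, some letter) else st)
    ((0 : Int), (none : Option String))
  st.2

-- ===== PORT B =====
def find_max_freq_alt (freq_dict : List (String × Int)) (excluded : List String) : Option String :=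
  let best := PySem.List.maxD ((freq_dict.filter (fun p => !(excluded.contains p.1))).map Prod.snd) (fun v => v) 0
  if best ≤ 0 then none
  else (freq_dict.find? (fun p => p.2 == best && !(excluded.contains p.1))).map Prod.fst

-- ===== PRECONDITION & SPEC =====
-- Pre_ requires distinct keys: freq_dict stands for a Python dict, and an association
-- list with duplicate keys does not represent any dict A can receive.
def Pre_find_max_freq (freq_dict : List (String × Int)) (excluded : List String) : Prop :=
  (freq_dict.map Prod.fst).Nodup
instance (freq_dict : List (String × Int)) (excluded : List String) : Decidable (Pre_find_max_freq freq_dict excluded) := by unfold Pre_find_max_freq; infer_instance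
def pvWitness_find_max_freq : (List (String × Int)) × List String := ([("e", 5), ("a", 3)], ["e"])

def Spec_find_max_freq (freq_dict : List (String × Int)) (excluded : List String) (out : Option String) : Prop := out = find_max_freq_alt freq_dict excluded
instance (freq_dict : List (String × Int)) (excluded : List String) (out : Option String) : Decidable (Spec_find_max_freq freq_dict excluded out) := by unfold Spec_find_max_freq; infer_instance

-- ===== CLAIM (what is proved, stated in full; the proofs are below) =====
def Claim_equal_find_max_freq : Prop := ∀ (freq_dict : List (String × Int)) (excluded : List String), Dom_find_max_freq freq_dict excluded → Pre_find_max_freq freq_dict excluded → Spec_find_max_freq freq_dict excluded (find_max_freq freq_dict excluded)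

-- ===== LEMMAS AND PROOFS =====

lemma pv_foldl_max_max (t : List Int) : ∀ a b : Int, t.foldl max (max a b) = max a (t.foldl max b) := by
  induction t with
  | nil => intro a b; rfl
  | cons c t ih =>
      intro a b
      simp only [List.foldl_cons, max_assoc, ih]

-- A's loop over the pair list, characterised by the eligible maximum and the first pair attaining it.
lemma pv_loopA_spec (ex : List String) (l : List (String × Int)) : ∀ (c : Int) (acc : Option String),
    l.foldl (fun (st : Int × Option String) p =>
        if decide (p.2 > st.1) && !(ex.contains p.1) then (p.2, some p.1) else st) (c, acc)
    = (if c < ((l.filter (fun p => !(ex.contains p.1))).map Prod.snd).foldl max c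
       then (((l.filter (fun p => !(ex.contains p.1))).map Prod.snd).foldl max c,
             (l.find? (fun p => p.2 == ((l.filter (fun p => !(ex.contains p.1))).map Prod.snd).foldl max c
                                 && !(ex.contains p.1))).map Prod.fst)
       else (c, acc)) := by
  induction l with
  | nil => intro c acc; simp
  | cons p t ih =>
      intro c acc
      by_cases he : ex.contains p.1 = true
      · -- p is excluded: the step is skipped, the filter drops p, the find? skips p
        simp only [List.foldl_cons, List.filter_cons, List.find?_cons, he, Bool.not_true,
          Bool.and_false, Bool.false_eq_true, if_false]
        exact ih c acc
      · have he' : ex.contains p.1 = false := by simpa using he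
        have hnc : (!ex.contains p.1) = true := by rw [he']; rfl
        rw [List.foldl_cons]
        dsimp only
        by_cases hgt : c < p.2
        · have hstep : (decide (p.2 > c) && !ex.contains p.1) = true := by
            rw [hnc, decide_eq_true hgt]; rfl
          have hmax : max c p.2 = p.2 := max_eq_right (le_of_lt hgt)
          rw [hstep, if_pos rfl, List.filter_cons]
          rw [hnc, if_pos rfl, List.map_cons, List.foldl_cons]
          rw [ih p.2 (some p.1), hmax]
          have hle : p.2 ≤ (List.map Prod.snd (t.filter fun p => !(ex.contains p.1))).foldl max p.2 :=
            (PySem.List.le_foldl_max _ p.2).1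
          set M := (List.map Prod.snd (t.filter fun p => !(ex.contains p.1))).foldl max p.2 with hM
          by_cases h2 : p.2 < M
          · have hpred : (p.2 == M && !ex.contains p.1) = false := by
              rw [beq_eq_false_iff_ne.mpr (ne_of_lt h2)]; rfl
            rw [if_pos h2, if_pos (lt_trans hgt h2),
                List.find?_cons_of_neg (by simp only [hpred, Bool.false_eq_true, not_false_eq_true])]
          · have heq : M = p.2 := le_antisymm (not_lt.mp h2) hle
            have hpred : (p.2 == M && !ex.contains p.1) = true := by
              rw [hnc, heq, beq_self_eq_true]; rfl
            rw [if_neg h2, if_pos (show c < M by rw [heq]; exact hgt),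
                List.find?_cons_of_pos (by simp only [hpred])]
            rw [heq]; rfl
        · have hstep : (decide (p.2 > c) && !ex.contains p.1) = false := by
            rw [decide_eq_false hgt]; rfl
          have hmax : max c p.2 = c := max_eq_left (not_lt.mp hgt)
          rw [hstep, if_neg Bool.false_ne_true, List.filter_cons]
          rw [hnc, if_pos rfl, List.map_cons, List.foldl_cons]
          rw [ih c acc, hmax]
          set M := (List.map Prod.snd (t.filter fun p => !(ex.contains p.1))).foldl max c with hM
          by_cases hcM : c < M
          · have hpred : (p.2 == M && !ex.contains p.1) = false := by
              rw [beq_eq_false_iff_ne.mpr (ne_of_lt (lt_of_le_of_lt (not_lt.mp hgt) hcM))]; rfl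
            rw [if_pos hcM, if_pos hcM,
                List.find?_cons_of_neg (by simp only [hpred, Bool.false_eq_true, not_false_eq_true])]
          · rw [if_neg hcM, if_neg hcM]

-- ===== VERDICT (by name: the statement is the Claim_ definition above) =====
theorem find_max_freq_spec : Claim_equal_find_max_freq := by
  intro fd ex _ hpre
  unfold Spec_find_max_freq find_max_freq find_max_freq_alt
  simp only [PySem.Dict.keys]
  rw [List.foldl_map]
  have hnd : (PySem.Dict.mk fd).keys.Nodup := by
    simpa [PySem.Dict.keys, show (PySem.Dict.mk fd).items = fd from rfl] using hpre
  rw [PySem.List.foldl_congr_mem _ _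
      (fun (st : Int × Option String) p =>
        if decide (p.2 > st.1) && !(ex.contains p.1) then (p.2, some p.1) else st) _
      (by
        intro acc x hx
        have hxp : (x.1, x.2) ∈ (PySem.Dict.mk fd).items := by simpa using hx
        have hget : PySem.Dict.getD (PySem.Dict.mk fd) x.1 0 = x.2 :=
          PySem.Dict.getD_of_mem_items _ hxp hnd 0
        rw [hget])]
  rw [pv_loopA_spec ex fd 0 none]
  -- relate the eligible max starting at 0 with Python's max(..., default=0)
  cases hv : (fd.filter (fun p => !(ex.contains p.1))).map Prod.snd with
  | nil => simp [PySem.List.maxD, PySem.List.max?]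
  | cons x t =>
      have hbest : PySem.List.maxD (x :: t) (fun v => v) 0 = t.foldl max x := by
        simp [PySem.List.maxD, PySem.List.max?_id_cons]
      have hM : (x :: t).foldl max 0 = max 0 (t.foldl max x) := by
        have h := pv_foldl_max_max t 0 x
        simpa using h
      rw [hbest, hM]
      by_cases hb : t.foldl max x ≤ 0
      · have h0 : ¬ (0 : Int) < max 0 (t.foldl max x) := by omega
        rw [if_neg h0, if_pos hb]
      · have h1 : max 0 (t.foldl max x) = t.foldl max x := by omega
        have h2 : (0 : Int) < max 0 (t.foldl max x) := by omega
        simp [h1, hb]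
        rw [if_pos (by omega : (0:Int) < List.foldl max x t)]
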